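-- pv_equiv track=rewrite | github.com/Khogao/Trading | scripts/find_near_duplicates.py | choose_keeper
-- ===== SOURCE A (Python) =====
-- def is_archive(path):
--     low = path.replace('\\','/').lower()
--     return '/archive/' in low or '/z_archive/' in low
--
-- def choose_keeper(group):
--     # selection heuristics similar to exact dedupe script
--     non_archive = [p for p in group if not is_archive(p)]
--     candidates = non_archive if non_archive else group
--     preferred = [p for p in candidates if '/production/' in p.replace('\\','/').lower() or '/volume_profile/' in p.replace('\\','/').lower()]
--     if preferred:
--         keeper = sorted(preferred, key=lambda x: len(x))[0]
--     else:
--         keeper = sorted(candidates, key=lambda x: len(x))[0]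
--     return keeper
-- ===== SOURCE B (Python) =====
-- def choose_keeper(group):
--     # One-pass ranked selection: lexicographic key (archive, not-preferred, length),
--     # first minimum wins (same value as A's filter + stable sort head).
--     def rank(p):
--         low = p.replace('\\', '/').lower()
--         archive = '/archive/' in low or '/z_archive/' in low
--         preferred = '/production/' in low or '/volume_profile/' in low
--         return (archive, not preferred, len(p))
--     keeper = group[0]
--     best = rank(keeper)
--     for p in group[1:]:
--         r = rank(p)
--         if r < best:
--             keeper, best = p, r
--     return keeper
-- ===== Notes on version B (the rewrite author's own statement) =====
-- stated objective: faster
-- what changed: A's two filter passes, branch on the preferred subset and stable sort-then-head are replaced by a single pass keeping the first element minimal under the lexicographic key (archive, not-preferred, length).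
import Mathlib
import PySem

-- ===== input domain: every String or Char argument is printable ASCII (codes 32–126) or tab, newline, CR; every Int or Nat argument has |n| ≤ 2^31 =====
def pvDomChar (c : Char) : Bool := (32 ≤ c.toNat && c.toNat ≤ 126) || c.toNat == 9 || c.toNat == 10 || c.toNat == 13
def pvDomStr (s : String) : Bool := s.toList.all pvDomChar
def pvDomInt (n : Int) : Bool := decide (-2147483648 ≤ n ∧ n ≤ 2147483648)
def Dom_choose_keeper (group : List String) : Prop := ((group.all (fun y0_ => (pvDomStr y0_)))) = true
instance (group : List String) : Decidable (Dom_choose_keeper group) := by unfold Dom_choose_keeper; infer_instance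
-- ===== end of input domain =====

-- B replaces A's two filter passes plus branch-and-sort by a single one-pass ranked
-- selection under the lexicographic key (archive, not-preferred, length): one pass instead
-- of a sort (measured faster in a timing run).

-- ===== PORT A =====
def is_archive (path : String) : Bool :=
  let low := PySem.Str.lower (PySem.Str.replace path "\\" "/")
  PySem.Str.isIn "/archive/" low || PySem.Str.isIn "/z_archive/" low

def choose_keeper (group : List String) : String :=
  let non_archive := group.filter (fun p => !is_archive p)
  let candidates := if non_archive ≠ [] then non_archive else group
  let preferred := candidates.filter (fun p =>
    PySem.Str.isIn "/production/" (PySem.Str.lower (PySem.Str.replace p "\\" "/")) ||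
    PySem.Str.isIn "/volume_profile/" (PySem.Str.lower (PySem.Str.replace p "\\" "/")))
  if preferred ≠ [] then
    -- preferred[0] after the stable sort; the "" default is never used under Pre_
    PySem.List.pyGetD (PySem.List.sorted preferred (fun x => PySem.Str.len x)) 0 ""
  else
    PySem.List.pyGetD (PySem.List.sorted candidates (fun x => PySem.Str.len x)) 0 ""

-- ===== PORT B =====
def rank (p : String) : Bool × Bool × Int :=
  let low := PySem.Str.lower (PySem.Str.replace p "\\" "/")
  (PySem.Str.isIn "/archive/" low || PySem.Str.isIn "/z_archive/" low,
   !(PySem.Str.isIn "/production/" low || PySem.Str.isIn "/volume_profile/" low),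
   PySem.Str.len p)

def ltBool : Bool → Bool → Bool
  | false, true => true
  | _, _ => false

-- Python's lexicographic '<' on the (bool, bool, int) rank tuples, written out.
def rankLt : Bool × Bool × Int → Bool × Bool × Int → Bool
  | (a1, b1, n1), (a2, b2, n2) =>
    ltBool a1 a2 || (a1 == a2 && (ltBool b1 b2 || (b1 == b2 && decide (n1 < n2))))

def choose_keeper_alt (group : List String) : String :=
  match group with
  | [] => ""   -- Python raises IndexError on group[0] here; excluded by Pre_
  | k :: rest =>
    (rest.foldl (fun st p =>
        let r := rank p
        if rankLt r st.2 then (p, r) else st) (k, rank k)).1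

-- ===== PRECONDITION & SPEC =====
-- Pre_ excludes only the empty list, on which A raises IndexError (and B's Python raises too).
def Pre_choose_keeper (group : List String) : Prop := group ≠ []
instance (group : List String) : Decidable (Pre_choose_keeper group) := by unfold Pre_choose_keeper; infer_instance
def pvWitness_choose_keeper : List String := (["/a/production/x", "/b/archive/y"])
def Spec_choose_keeper (group : List String) (out : String) : Prop := out = choose_keeper_alt group
instance (group : List String) (out : String) : Decidable (Spec_choose_keeper group out) := by unfold Spec_choose_keeper; infer_instance

-- ===== CLAIM (what is proved, stated in full; the proofs are below) =====
def Claim_equal_choose_keeper : Prop := ∀ (group : List String), Dom_choose_keeper group → Pre_choose_keeper group → Spec_choose_keeper group (choose_keeper group)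

-- ===== LEMMAS AND PROOFS =====

-- proof-side abbreviations for the two comparison functions in play
def ltR (u v : String) : Bool := rankLt (rank u) (rank v)
def ltLen (u v : String) : Bool := decide (PySem.Str.len u < PySem.Str.len v)
-- the (archive, not-preferred) flag pair of a path, and the lexicographic order on pairs
def pairOf (p : String) : Bool × Bool := ((rank p).1, (rank p).2.1)
def pairLt (u v : Bool × Bool) : Bool := ltBool u.1 v.1 || (u.1 == v.1 && ltBool u.2 v.2)

-- "first minimum" fold and its specification
def foldMin {α : Type} (lt : α → α → Bool) (b : α) (l : List α) : α :=
  l.foldl (fun best y => if lt y best then y else best) b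

def FirstMin {α : Type} (lt : α → α → Bool) (l : List α) (x : α) : Prop :=
  ∃ pre suf, l = pre ++ x :: suf ∧ (∀ y ∈ pre, lt x y = true) ∧ (∀ y ∈ suf, lt y x = false)

theorem foldMin_cases {α : Type} (lt : α → α → Bool)
    (H1 : ∀ a b c, lt a b = true → lt b c = true → lt a c = true)
    (H2 : ∀ a b c, lt a b = true → lt c b = false → lt a c = true) :
    ∀ (l : List α) (b : α),
      (foldMin lt b l = b ∧ ∀ y ∈ l, lt y b = false) ∨
      (lt (foldMin lt b l) b = true ∧ FirstMin lt l (foldMin lt b l)) := by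
  intro l
  induction l with
  | nil => intro b; left; simp [foldMin]
  | cons y t ih =>
    intro b
    by_cases hyb : lt y b = true
    · have hstep : foldMin lt b (y :: t) = foldMin lt y t := by
        simp [foldMin, hyb]
      rcases ih y with ⟨he, hall⟩ | ⟨hlt, pre, suf, hdec, hpre, hsuf⟩
      · right
        rw [hstep, he]
        exact ⟨hyb, [], t, rfl, by simp, hall⟩
      · right
        rw [hstep]
        refine ⟨H1 _ _ _ hlt hyb, y :: pre, suf, by rw [List.cons_append, ← hdec], ?_, hsuf⟩
        intro z hz
        rcases List.mem_cons.mp hz with rfl | hz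
        · exact hlt
        · exact hpre z hz
    · have hyb' : lt y b = false := by simpa using hyb
      have hstep : foldMin lt b (y :: t) = foldMin lt b t := by
        simp [foldMin, hyb']
      rcases ih b with ⟨he, hall⟩ | ⟨hlt, pre, suf, hdec, hpre, hsuf⟩
      · left
        rw [hstep, he]
        refine ⟨rfl, ?_⟩
        intro z hz
        rcases List.mem_cons.mp hz with rfl | hz
        · exact hyb'
        · exact hall z hz
      · right
        rw [hstep]
        refine ⟨hlt, y :: pre, suf, by rw [List.cons_append, ← hdec], ?_, hsuf⟩
        intro z hz
        rcases List.mem_cons.mp hz with rfl | hz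
        · exact H2 _ _ _ hlt hyb'
        · exact hpre z hz

theorem foldMin_firstMin {α : Type} (lt : α → α → Bool)
    (H1 : ∀ a b c, lt a b = true → lt b c = true → lt a c = true)
    (H2 : ∀ a b c, lt a b = true → lt c b = false → lt a c = true)
    (b : α) (l : List α) : FirstMin lt (b :: l) (foldMin lt b l) := by
  rcases foldMin_cases lt H1 H2 l b with ⟨he, hall⟩ | ⟨hlt, pre, suf, hdec, hpre, hsuf⟩
  · exact ⟨[], l, by simp [he], by simp, by rw [he]; exact hall⟩
  · refine ⟨b :: pre, suf, by rw [List.cons_append, ← hdec], ?_, hsuf⟩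
    intro z hz
    rcases List.mem_cons.mp hz with rfl | hz
    · exact hlt
    · exact hpre z hz

theorem firstMin_unique_aux {α : Type} (lt : α → α → Bool) :
    ∀ (p1 p2 : List α) (x x' : α) (s1 s2 : List α),
      p1 ++ x :: s1 = p2 ++ x' :: s2 →
      (∀ y ∈ p1, lt x y = true) → (∀ y ∈ s1, lt y x = false) →
      (∀ y ∈ p2, lt x' y = true) → (∀ y ∈ s2, lt y x' = false) → x = x' := by
  intro p1
  induction p1 with
  | nil =>
    intro p2 x x' s1 s2 he hp1 hs1 hp2 hs2
    cases p2 with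
    | nil => exact (List.cons.inj he).1
    | cons c p2' =>
      rw [List.nil_append, List.cons_append] at he
      obtain ⟨rfl, hts⟩ := List.cons.inj he
      have hx' : x' ∈ s1 := by rw [hts]; exact List.mem_append_right _ (List.mem_cons_self ..)
      have h1 := hs1 x' hx'
      have h2 := hp2 x (List.mem_cons_self ..)
      rw [h1] at h2; exact absurd h2 (by simp)
  | cons h p1' ih =>
    intro p2 x x' s1 s2 he hp1 hs1 hp2 hs2
    cases p2 with
    | nil =>
      rw [List.cons_append, List.nil_append] at he
      obtain ⟨he1, hts⟩ := List.cons.inj he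
      have hx : x ∈ s2 := by rw [← hts]; exact List.mem_append_right _ (List.mem_cons_self ..)
      have h1 := hs2 x hx
      have h2 := hp1 h (List.mem_cons_self ..)
      rw [he1] at h2
      rw [h1] at h2; exact absurd h2 (by simp)
    | cons c p2' =>
      rw [List.cons_append, List.cons_append] at he
      obtain ⟨rfl, hts⟩ := List.cons.inj he
      exact ih p2' x x' s1 s2 hts
        (fun y hy => hp1 y (List.mem_cons_of_mem _ hy)) hs1
        (fun y hy => hp2 y (List.mem_cons_of_mem _ hy)) hs2

theorem firstMin_unique {α : Type} (lt : α → α → Bool) (l : List α) (x x' : α)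
    (h : FirstMin lt l x) (h' : FirstMin lt l x') : x = x' := by
  obtain ⟨p1, s1, e1, hp1, hs1⟩ := h
  obtain ⟨p2, s2, e2, hp2, hs2⟩ := h'
  exact firstMin_unique_aux lt p1 p2 x x' s1 s2 (by rw [← e1, e2]) hp1 hs1 hp2 hs2

-- order facts about rankLt / pairLt
theorem rankLt_trans (u v w : Bool × Bool × Int)
    (h1 : rankLt u v = true) (h2 : rankLt v w = true) : rankLt u w = true := by
  rcases u with ⟨a1, b1, n1⟩; rcases v with ⟨a2, b2, n2⟩; rcases w with ⟨a3, b3, n3⟩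
  cases a1 <;> cases a2 <;> cases a3 <;> cases b1 <;> cases b2 <;> cases b3 <;>
    simp_all [rankLt, ltBool] <;> omega

theorem rankLt_lt_of_le (u v w : Bool × Bool × Int)
    (h1 : rankLt u v = true) (h2 : rankLt w v = false) : rankLt u w = true := by
  rcases u with ⟨a1, b1, n1⟩; rcases v with ⟨a2, b2, n2⟩; rcases w with ⟨a3, b3, n3⟩
  cases a1 <;> cases a2 <;> cases a3 <;> cases b1 <;> cases b2 <;> cases b3 <;>
    simp_all [rankLt, ltBool] <;> omega

theorem rankLt_pair_eq (u v : Bool × Bool × Int)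
    (h1 : u.1 = v.1) (h2 : u.2.1 = v.2.1) : rankLt u v = decide (u.2.2 < v.2.2) := by
  rcases u with ⟨a1, b1, n1⟩; rcases v with ⟨a2, b2, n2⟩
  simp only at h1 h2; subst h1; subst h2
  cases a1 <;> cases b1 <;> simp [rankLt, ltBool]

theorem rankLt_of_pairLt (u v : Bool × Bool × Int)
    (h : pairLt (u.1, u.2.1) (v.1, v.2.1) = true) :
    rankLt u v = true ∧ rankLt v u = false := by
  rcases u with ⟨a1, b1, n1⟩; rcases v with ⟨a2, b2, n2⟩
  cases a1 <;> cases a2 <;> cases b1 <;> cases b2 <;>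
    simp_all [pairLt, rankLt, ltBool]

-- transitivity facts instantiated for the two string orders
theorem ltLen_H1 (a b c : String) (h1 : ltLen a b = true) (h2 : ltLen b c = true) :
    ltLen a c = true := by simp [ltLen] at *; omega
theorem ltLen_H2 (a b c : String) (h1 : ltLen a b = true) (h2 : ltLen c b = false) :
    ltLen a c = true := by simp [ltLen] at *; omega
theorem ltR_H1 (a b c : String) (h1 : ltR a b = true) (h2 : ltR b c = true) :
    ltR a c = true := rankLt_trans _ _ _ h1 h2
theorem ltR_H2 (a b c : String) (h1 : ltR a b = true) (h2 : ltR c b = false) :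
    ltR a c = true := rankLt_lt_of_le _ _ _ h1 h2

-- the one-pass fold of port B computes foldMin under ltR
theorem altFold_fst :
    ∀ (t : List String) (k : String),
      (t.foldl (fun st p =>
          let r := rank p
          if rankLt r st.2 then (p, r) else st) (k, rank k)).1
        = foldMin ltR k t := by
  intro t
  induction t with
  | nil => intro k; rfl
  | cons p tl ih =>
    intro k
    simp only [List.foldl, foldMin, ltR]
    by_cases h : rankLt (rank p) (rank k) = true
    · simp only [h, if_true]
      have := ih p
      simpa [foldMin, ltR] using this
    · have h' : rankLt (rank p) (rank k) = false := by simpa using h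
      simp only [h', if_false, Bool.false_eq_true]
      have := ih k
      simpa [foldMin, ltR] using this

-- head of the stable insertion sort = foldMin of the key-lt
theorem insert_fold_head {α : Type} (bf : α → α → Bool) :
    ∀ (xs : List α) (h : α) (t : List α),
      ∃ t', xs.foldl (fun acc x => PySem.List.insertBy bf x acc) (h :: t)
            = (foldMin (fun x y => bf x y) h xs) :: t' := by
  intro xs
  induction xs with
  | nil => intro h t; exact ⟨t, by simp [foldMin]⟩
  | cons x xs ih =>
    intro h t
    simp only [List.foldl]
    by_cases hb : bf x h = true
    · rw [show PySem.List.insertBy bf x (h :: t) = x :: h :: t from by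
        simp [PySem.List.insertBy, hb]]
      obtain ⟨t', ht'⟩ := ih x (h :: t)
      exact ⟨t', by rw [ht']; simp [foldMin, hb]⟩
    · have hb' : bf x h = false := by simpa using hb
      rw [show PySem.List.insertBy bf x (h :: t) = h :: PySem.List.insertBy bf x t from by
        simp [PySem.List.insertBy, hb']]
      obtain ⟨t', ht'⟩ := ih h (PySem.List.insertBy bf x t)
      exact ⟨t', by rw [ht']; simp [foldMin, hb']⟩

theorem sorted_head (key : String → Int) (s : String) (rest : List String) :
    PySem.List.pyGetD (PySem.List.sorted (s :: rest) (fun x => key x)) 0 ""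
      = foldMin (fun x y => decide (key x < key y)) s rest := by
  rw [PySem.List.sorted_eq_foldl_insertBy]
  simp only [List.foldl]
  rw [show PySem.List.insertBy (fun a b => decide (key a < key b)) s [] = [s] from by
    simp [PySem.List.insertBy]]
  obtain ⟨t', ht'⟩ := insert_fold_head (fun a b => decide (key a < key b)) rest s []
  rw [ht', PySem.List.pyGetD_zero_cons]

-- lifting a first-minimum by length inside the selected tier to a first-minimum by rank
theorem lift_firstMin (q : String → Bool) (group : List String) (x : String)
    (aS bS : Bool)
    (hqt : ∀ p ∈ group, q p = true → (rank p).1 = aS ∧ (rank p).2.1 = bS)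
    (hqf : ∀ p ∈ group, q p = false → pairLt (aS, bS) ((rank p).1, (rank p).2.1) = true)
    (h : FirstMin ltLen (group.filter q) x) :
    FirstMin ltR group x := by
  obtain ⟨preS, sufS, hS, hpreS, hsufS⟩ := h
  obtain ⟨l1, l2', hl, hfil1, hfil2'⟩ := List.filter_eq_append_iff.mp hS
  obtain ⟨l2a, l2b, hl2, hnone, hqx, hfil2b⟩ := List.filter_eq_cons_iff.mp hfil2'
  have hxmem : x ∈ group := by
    rw [hl, hl2]; exact List.mem_append_right _ (List.mem_append_right _ (List.mem_cons_self ..))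
  have hxp := hqt x hxmem hqx
  refine ⟨l1 ++ l2a, l2b, by rw [hl, hl2]; simp, ?_, ?_⟩
  · intro y hy
    have hymem : y ∈ group := by
      rw [hl, hl2]
      rcases List.mem_append.mp hy with hy | hy
      · exact List.mem_append_left _ hy
      · exact List.mem_append_right _ (List.mem_append_left _ hy)
    rcases List.mem_append.mp hy with hy | hy
    · by_cases hqy : q y = true
      · have hyS : y ∈ preS := by rw [← hfil1]; exact List.mem_filter.mpr ⟨hy, hqy⟩
        have hlen := hpreS y hyS
        have hyp := hqt y hymem hqy
        show rankLt (rank x) (rank y) = true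
        rw [rankLt_pair_eq _ _ (by rw [hxp.1, hyp.1]) (by rw [hxp.2, hyp.2]),
          show (rank x).2.2 = PySem.Str.len x from by simp [rank],
          show (rank y).2.2 = PySem.Str.len y from by simp [rank]]
        simpa [ltLen] using hlen
      · have hqy' : q y = false := by simpa using hqy
        have := rankLt_of_pairLt (rank x) (rank y)
          (by rw [hxp.1, hxp.2]; exact hqf y hymem hqy')
        exact this.1
    · have hqy' : q y = false := by simpa using hnone y hy
      have := rankLt_of_pairLt (rank x) (rank y)
        (by rw [hxp.1, hxp.2]; exact hqf y hymem hqy')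
      exact this.1
  · intro y hy
    have hymem : y ∈ group := by
      rw [hl, hl2]
      exact List.mem_append_right _ (List.mem_append_right _ (List.mem_cons_of_mem _ hy))
    by_cases hqy : q y = true
    · have hyS : y ∈ sufS := by rw [← hfil2b]; exact List.mem_filter.mpr ⟨hy, hqy⟩
      have hlen := hsufS y hyS
      have hyp := hqt y hymem hqy
      show rankLt (rank y) (rank x) = false
      rw [rankLt_pair_eq _ _ (by rw [hxp.1, hyp.1]) (by rw [hxp.2, hyp.2]),
        show (rank y).2.2 = PySem.Str.len y from by simp [rank],
        show (rank x).2.2 = PySem.Str.len x from by simp [rank]]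
      simpa [ltLen] using hlen
    · have hqy' : q y = false := by simpa using hqy
      have := rankLt_of_pairLt (rank x) (rank y)
        (by rw [hxp.1, hxp.2]; exact hqf y hymem hqy')
      exact this.2

-- tier selection: the head of the sorted tier list is the first ltR-minimum of the group
theorem tier_firstMin (q : String → Bool) (group : List String)
    (aS bS : Bool)
    (hqt : ∀ p ∈ group, q p = true → (rank p).1 = aS ∧ (rank p).2.1 = bS)
    (hqf : ∀ p ∈ group, q p = false → pairLt (aS, bS) ((rank p).1, (rank p).2.1) = true)
    (hne : group.filter q ≠ []) :
    FirstMin ltR group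
      (PySem.List.pyGetD (PySem.List.sorted (group.filter q) (fun x => PySem.Str.len x)) 0 "") := by
  obtain ⟨t, ts, hT⟩ := List.exists_cons_of_ne_nil hne
  rw [hT, sorted_head]
  have hfm : FirstMin ltLen (group.filter q) (foldMin ltLen t ts) := by
    rw [hT]
    exact foldMin_firstMin ltLen ltLen_H1 ltLen_H2 t ts
  exact lift_firstMin q group _ aS bS hqt hqf hfm

-- the predicates of A in terms of rank
theorem archive_eq_rank (p : String) : is_archive p = (rank p).1 := by simp [is_archive, rank]

theorem pref_eq_rank (p : String) :
    (PySem.Str.isIn "/production/" (PySem.Str.lower (PySem.Str.replace p "\\" "/")) ||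
     PySem.Str.isIn "/volume_profile/" (PySem.Str.lower (PySem.Str.replace p "\\" "/")))
      = !(rank p).2.1 := by
  simp [rank]

-- small computations on the pair order
theorem pairLt_ffff (a b : Bool) : pairLt (false, false) (a, b) = (a || b) := by
  cases a <;> cases b <;> rfl
theorem pairLt_fftt (a b : Bool) : pairLt (false, true) (a, b) = a := by
  cases a <;> cases b <;> rfl
theorem pairLt_ttff (a b : Bool) : pairLt (true, false) (a, b) = (a && b) := by
  cases a <;> cases b <;> rfl

-- A's value is a first ltR-minimum of the group
theorem A_firstMin (g : String) (gs : List String) :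
    FirstMin ltR (g :: gs) (choose_keeper (g :: gs)) := by
  simp only [choose_keeper]
  by_cases hna : (g :: gs).filter (fun p => !is_archive p) ≠ []
  · rw [if_pos hna]
    by_cases hp : ((g :: gs).filter (fun p => !is_archive p)).filter (fun p =>
        PySem.Str.isIn "/production/" (PySem.Str.lower (PySem.Str.replace p "\\" "/")) ||
        PySem.Str.isIn "/volume_profile/" (PySem.Str.lower (PySem.Str.replace p "\\" "/"))) ≠ []
    · rw [if_pos hp]
      rw [List.filter_filter] at hp ⊢
      refine tier_firstMin _ _ false false ?_ ?_ hp
      · intro p _ hq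
        rw [Bool.and_eq_true] at hq
        obtain ⟨hq1, hq2⟩ := hq
        rw [pref_eq_rank] at hq1
        rw [archive_eq_rank] at hq2
        exact ⟨by simpa using hq2, by simpa using hq1⟩
      · intro p _ hq
        rw [pref_eq_rank, archive_eq_rank] at hq
        rw [pairLt_ffff]
        cases hA : (rank p).1 <;> cases hB : (rank p).2.1 <;>
          rw [hA, hB] at hq <;> simp at hq ⊢
    · have hp0 : ((g :: gs).filter (fun p => !is_archive p)).filter (fun p =>
          PySem.Str.isIn "/production/" (PySem.Str.lower (PySem.Str.replace p "\\" "/")) ||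
          PySem.Str.isIn "/volume_profile/" (PySem.Str.lower (PySem.Str.replace p "\\" "/"))) = [] :=
        of_not_not hp
      rw [if_neg hp]
      have hallnp : ∀ p ∈ (g :: gs).filter (fun p => !is_archive p), (rank p).2.1 = true := by
        intro p hpmem
        have h2 := List.filter_eq_nil_iff.mp hp0 p hpmem
        rw [pref_eq_rank] at h2
        simpa using h2
      refine tier_firstMin (fun p => !is_archive p) _ false true ?_ ?_ hna
      · intro p hpmem hq
        have hq' : (rank p).1 = false := by
          rw [← archive_eq_rank]; simpa using hq
        exact ⟨hq', hallnp p (List.mem_filter.mpr ⟨hpmem, hq⟩)⟩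
      · intro p _ hq
        have hq' : (rank p).1 = true := by
          rw [← archive_eq_rank]; simpa using hq
        rw [pairLt_fftt, hq']
  · have hna0 : (g :: gs).filter (fun p => !is_archive p) = [] := of_not_not hna
    have hallarch : ∀ p ∈ (g :: gs), (rank p).1 = true := by
      intro p hpmem
      have h2 := List.filter_eq_nil_iff.mp hna0 p hpmem
      rw [← archive_eq_rank]
      simpa using h2
    rw [if_neg hna]
    by_cases hp : (g :: gs).filter (fun p =>
        PySem.Str.isIn "/production/" (PySem.Str.lower (PySem.Str.replace p "\\" "/")) ||
        PySem.Str.isIn "/volume_profile/" (PySem.Str.lower (PySem.Str.replace p "\\" "/"))) ≠ []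
    · rw [if_pos hp]
      refine tier_firstMin _ _ true false ?_ ?_ hp
      · intro p hpmem hq
        rw [pref_eq_rank] at hq
        exact ⟨hallarch p hpmem, by simpa using hq⟩
      · intro p hpmem hq
        rw [pref_eq_rank] at hq
        have h2 : (rank p).2.1 = true := by simpa using hq
        rw [pairLt_ttff, hallarch p hpmem, h2]; rfl
    · have hp0 : (g :: gs).filter (fun p =>
          PySem.Str.isIn "/production/" (PySem.Str.lower (PySem.Str.replace p "\\" "/")) ||
          PySem.Str.isIn "/volume_profile/" (PySem.Str.lower (PySem.Str.replace p "\\" "/"))) = [] :=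
        of_not_not hp
      rw [if_neg hp]
      have hallnp : ∀ p ∈ (g :: gs), (rank p).2.1 = true := by
        intro p hpmem
        have h2 := List.filter_eq_nil_iff.mp hp0 p hpmem
        rw [pref_eq_rank] at h2
        simpa using h2
      have hfull : (g :: gs).filter (fun _ => true) = g :: gs := List.filter_true _
      have hres := tier_firstMin (fun _ => true) (g :: gs) true true
        (fun p hpmem _ => ⟨hallarch p hpmem, hallnp p hpmem⟩)
        (fun p _ hq => by simp at hq)
        (by rw [hfull]; exact List.cons_ne_nil _ _)
      rw [hfull] at hres
      exact hres

-- ===== VERDICT (by name: the statement is the Claim_ definition above) =====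
theorem choose_keeper_spec : Claim_equal_choose_keeper := by
  intro group _ hpre
  unfold Spec_choose_keeper
  obtain ⟨g, gs, rfl⟩ := List.exists_cons_of_ne_nil hpre
  have hB : choose_keeper_alt (g :: gs) = foldMin ltR g gs := altFold_fst gs g
  have hBfm : FirstMin ltR (g :: gs) (choose_keeper_alt (g :: gs)) := by
    rw [hB]; exact foldMin_firstMin ltR ltR_H1 ltR_H2 g gs
  exact firstMin_unique ltR (g :: gs) _ _ (A_firstMin g gs) hBfm
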